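-- pv_equiv track=rewrite | github.com/ashroy6/infrarag | backend/app/hybrid_retrieve.py | _entity_presence_counts
-- ===== SOURCE A (Python) =====
-- from typing import Any
--
-- def _entity_presence_counts(hits: list[dict[str, Any]], entities: list[str]) -> dict[str, int]:
--     counts = {entity: 0 for entity in entities[:2]}
--     for hit in hits:
--         present = set(hit.get("comparison_present_entities") or [])
--         for entity in counts:
--             if entity in present:
--                 counts[entity] += 1
--     return counts
-- ===== SOURCE B (Python) =====
-- def _entity_presence_counts(hits: list, entities: list) -> dict:
--     # Tally every entity seen across all hits once, then read off the two requested ones.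
--     table = {}
--     for hit in hits:
--         for entity in set(hit.get("comparison_present_entities") or []):
--             table[entity] = table.get(entity, 0) + 1
--     return {entity: table.get(entity, 0) for entity in entities[:2]}
-- ===== Notes on version B (the rewrite author's own statement) =====
-- stated objective: alternative
-- what changed: Instead of scanning the two tracked entities inside every hit, B builds one global tally dict of all present entities in a single pass and then reads the two requested counts off the table with a 0 default.
import Mathlib
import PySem

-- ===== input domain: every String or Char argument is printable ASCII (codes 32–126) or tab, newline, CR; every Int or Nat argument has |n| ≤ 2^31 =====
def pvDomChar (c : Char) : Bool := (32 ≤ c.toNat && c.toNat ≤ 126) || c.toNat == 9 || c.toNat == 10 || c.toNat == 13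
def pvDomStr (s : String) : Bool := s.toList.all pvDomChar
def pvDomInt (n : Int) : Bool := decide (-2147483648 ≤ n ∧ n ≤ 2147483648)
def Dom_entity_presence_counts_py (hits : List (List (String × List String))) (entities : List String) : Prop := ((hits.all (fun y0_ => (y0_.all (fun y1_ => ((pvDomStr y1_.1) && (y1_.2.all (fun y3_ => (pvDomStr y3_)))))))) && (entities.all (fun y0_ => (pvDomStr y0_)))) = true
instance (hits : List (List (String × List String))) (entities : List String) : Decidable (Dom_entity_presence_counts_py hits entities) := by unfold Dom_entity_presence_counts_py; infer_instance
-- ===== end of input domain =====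

-- ===== PORT A =====
-- B tallies all present entities into one dict in a single pass, then reads off the two
-- requested counts; A probes each tracked entity inside every hit. Equivalence is proved below.

-- ===== PORT A =====
-- shared helper: set(hit.get("comparison_present_entities") or []) — getD [] is exact since
-- the only falsy list value is [] and a missing key also yields []
def pvPresent (hit : List (String × List String)) : PySem.Set String :=
  PySem.Set.ofList ((PySem.Dict.mk hit).getD "comparison_present_entities" [])

def entity_presence_counts_py (hits : List (List (String × List String))) (entities : List String) : List (String × Int) :=
  -- counts = {entity: 0 for entity in entities[:2]}
  let counts0 : PySem.Dict String Int :=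
    (entities.take 2).foldl (fun d e => d.insert e 0) PySem.Dict.empty
  -- for hit in hits: present = set(...); for entity in counts: if entity in present: counts[entity] += 1
  let counts :=
    hits.foldl (fun counts hit =>
      let present := pvPresent hit
      counts.keys.foldl
        (fun c entity => if present.contains entity then c.modify entity 0 (· + 1) else c)
        counts) counts0
  counts.items

-- ===== PORT B =====
def entity_presence_counts_py_alt (hits : List (List (String × List String))) (entities : List String) : List (String × Int) :=
  -- table = {}; for hit: for entity in set(...): table[entity] = table.get(entity, 0) + 1
  let table : PySem.Dict String Int :=
    hits.foldl (fun t hit => (pvPresent hit).foldl (fun t e => t.modify e 0 (· + 1)) t)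
      PySem.Dict.empty
  -- {entity: table.get(entity, 0) for entity in entities[:2]}
  ((entities.take 2).foldl (fun d e => d.insert e (table.getD e 0)) PySem.Dict.empty).items

-- ===== PRECONDITION & SPEC =====
def Spec_entity_presence_counts_py (hits : List (List (String × List String))) (entities : List String) (out : List (String × Int)) : Prop := out = entity_presence_counts_py_alt hits entities
instance (hits : List (List (String × List String))) (entities : List String) (out : List (String × Int)) : Decidable (Spec_entity_presence_counts_py hits entities out) := by unfold Spec_entity_presence_counts_py; infer_instance

-- ===== CLAIM (what is proved, stated in full; the proofs are below) =====
def Claim_equal_entity_presence_counts_py : Prop := ∀ (hits : List (List (String × List String))) (entities : List String), Dom_entity_presence_counts_py hits entities → Spec_entity_presence_counts_py hits entities (entity_presence_counts_py hits entities)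

-- ===== LEMMAS AND PROOFS =====

-- getD through a fold of inserts whose value does not depend on the accumulator
theorem pv_getD_foldl_insert_fun (l : List String) (g : String → Int) (d : PySem.Dict String Int) (x : String) :
    (l.foldl (fun d e => d.insert e (g e)) d).getD x 0 = if x ∈ l then g x else d.getD x 0 := by
  induction l generalizing d with
  | nil => simp
  | cons a l ih =>
    simp only [List.foldl_cons, ih, List.mem_cons]
    by_cases hx : x ∈ l
    · simp [hx]
    · by_cases hxa : x = a <;> simp [hx, hxa, PySem.Dict.getD_insert]

-- count in a duplicate-free list is a 0/1 indicator
theorem pv_count_nodup (l : List String) (x : String) (h : l.Nodup) :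
    l.count x = if x ∈ l then 1 else 0 := by
  by_cases hx : x ∈ l
  · simp [hx, List.count_eq_one_of_mem h hx]
  · simp [hx, List.count_eq_zero_of_not_mem hx]

-- B's table: getD reads off the number of hits whose present-set mentions x
theorem pv_table_getD (hits : List (List (String × List String))) (t : PySem.Dict String Int) (x : String) :
    (hits.foldl (fun t hit => (pvPresent hit).foldl (fun t e => t.modify e 0 (· + 1)) t) t).getD x 0
      = t.getD x 0 + (hits.countP (fun hit => (pvPresent hit).contains x) : Int) := by
  induction hits generalizing t with
  | nil => simp
  | cons hit hits ih =>
    have hndp : (pvPresent hit).Nodup := by unfold pvPresent; exact PySem.Set.nodup_ofList _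
    simp only [List.foldl_cons, ih, PySem.Dict.getD_foldl_modify_add_one, List.countP_cons,
      pv_count_nodup _ x hndp]
    by_cases hx : (pvPresent hit).contains x = true
    · have hm : x ∈ pvPresent hit := (PySem.Set.contains_iff _ _).mp hx
      simp [hm]
      ring
    · have hm : x ∉ pvPresent hit := fun hmem => hx ((PySem.Set.contains_iff _ _).mpr hmem)
      simp [hm]

-- A's inner loop preserves the key list when every visited key is present
theorem pv_innerA_keys (ks : List String) (p : String → Bool) (c : PySem.Dict String Int)
    (h : ∀ k ∈ ks, c.contains k = true) :
    (ks.foldl (fun c e => if p e then c.modify e 0 (· + 1) else c) c).keys = c.keys := by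
  induction ks generalizing c with
  | nil => rfl
  | cons a ks ih =>
    simp only [List.foldl_cons]
    by_cases hp : p a = true
    · rw [hp]
      simp only [if_true]
      have hca : c.contains a = true := h a (by simp)
      rw [ih]
      · rw [PySem.Dict.keys_modify, PySem.Dict.keys_insert_of_contains c _ hca]
      · intro k hk
        rw [PySem.Dict.contains_modify]
        simp [h k (by simp [hk])]
    · simp only [hp]
      exact ih c (fun k hk => h k (List.mem_cons_of_mem _ hk))

-- A's inner loop adds the 0/1 indicator to each visited key
theorem pv_innerA_getD (ks : List String) (p : String → Bool) (c : PySem.Dict String Int)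
    (hnd : ks.Nodup) (x : String) :
    (ks.foldl (fun c e => if p e then c.modify e 0 (· + 1) else c) c).getD x 0
      = c.getD x 0 + (if x ∈ ks ∧ p x = true then 1 else 0) := by
  induction ks generalizing c with
  | nil => simp
  | cons a ks ih =>
    have hnd' : ks.Nodup := hnd.of_cons
    have hax : a ∉ ks := (List.nodup_cons.mp hnd).1
    simp only [List.foldl_cons, ih _ hnd']
    by_cases hp : p a = true
    · simp only [hp, if_true]
      rw [PySem.Dict.getD_modify]
      by_cases hxa : x = a
      · subst hxa
        simp [hax, hp]
      · simp [hxa, List.mem_cons]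
    · simp only [hp, List.mem_cons]
      by_cases hxa : x = a
      · subst hxa; simp [hp]
      · simp [hxa]

-- A's outer loop: keys are preserved and each tracked key counts its hits
theorem pv_outerA (hits : List (List (String × List String))) (c : PySem.Dict String Int)
    (hnd : c.keys.Nodup) :
    (hits.foldl (fun counts hit =>
        counts.keys.foldl
          (fun c entity => if (pvPresent hit).contains entity then c.modify entity 0 (· + 1) else c)
          counts) c).keys = c.keys ∧
    ∀ x ∈ c.keys,
      (hits.foldl (fun counts hit =>
          counts.keys.foldl
            (fun c entity => if (pvPresent hit).contains entity then c.modify entity 0 (· + 1) else c)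
            counts) c).getD x 0
        = c.getD x 0 + (hits.countP (fun hit => (pvPresent hit).contains x) : Int) := by
  induction hits generalizing c with
  | nil => simp
  | cons hit hits ih =>
    simp only [List.foldl_cons]
    set c' := c.keys.foldl
        (fun c entity => if (pvPresent hit).contains entity then c.modify entity 0 (· + 1) else c) c with hc'
    have hkeys : c'.keys = c.keys := by
      apply pv_innerA_keys
      intro k hk
      exact (PySem.Dict.contains_iff_mem_keys _ _).mpr hk
    have hnd' : c'.keys.Nodup := by rw [hkeys]; exact hnd
    obtain ⟨ihk, ihv⟩ := ih c' hnd'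
    refine ⟨by rw [ihk, hkeys], ?_⟩
    intro x hx
    rw [ihv x (by rw [hkeys]; exact hx), hc', pv_innerA_getD c.keys _ c hnd x]
    simp only [List.countP_cons]
    simp [hx]
    ring

-- keys of the initial comprehension, shared by both sides
theorem pv_keys_init (l : List String) (g : String → Int) :
    (l.foldl (fun d e => d.insert e (g e)) (PySem.Dict.empty : PySem.Dict String Int)).keys
      = PySem.Set.ofList l := by
  rw [PySem.Dict.keys_foldl_insert]
  simp [PySem.Set.ofList_eq_foldl, PySem.Set.update]

theorem pv_nodup_init (l : List String) (g : String → Int) :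
    (l.foldl (fun d e => d.insert e (g e)) (PySem.Dict.empty : PySem.Dict String Int)).keys.Nodup := by
  apply PySem.Dict.nodup_keys_foldl_insert
  simp

-- ===== VERDICT (by name: the statement is the Claim_ definition above) =====
theorem entity_presence_counts_py_spec : Claim_equal_entity_presence_counts_py := by
  intro hits entities _
  unfold Spec_entity_presence_counts_py entity_presence_counts_py entity_presence_counts_py_alt
  simp only []
  set l := entities.take 2
  obtain ⟨hk, hv⟩ := pv_outerA hits
    (l.foldl (fun d e => d.insert e 0) PySem.Dict.empty) (pv_nodup_init l (fun _ => 0))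
  rw [PySem.Dict.items_eq_map_keys _ (by rw [hk]; exact pv_nodup_init l (fun _ => 0)) 0,
      PySem.Dict.items_eq_map_keys _ (pv_nodup_init l _) 0, hk]
  rw [pv_keys_init l (fun _ => 0), pv_keys_init l _]
  apply List.map_congr_left
  intro x hxE
  have hxl : x ∈ l := (PySem.Set.mem_ofList l x).mp hxE
  rw [hv x (by rw [pv_keys_init l (fun _ => 0)]; exact hxE)]
  rw [pv_getD_foldl_insert_fun l (fun _ => 0), pv_getD_foldl_insert_fun l _]
  simp [hxl, pv_table_getD hits PySem.Dict.empty x]
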